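-- pv_equiv track=rewrite | github.com/Vegetable-bird10086/Machine-Learning-for-Bin-Packing-Problem | task3.py | select_container
-- ===== SOURCE A (Python) =====
-- def select_container(items, containers):
--     # 找出最大的长、宽、高
--     max_length = max(item[0] for item in items)  # 最大长度
--     max_width = max(item[1] for item in items)   # 最大宽度
--     max_height = max(item[2] for item in items)  # 最大高度
--
--     # 计算最大物体的体积
--     thr_volume = max(item[0] * item[1] * item[2] for item in items)
--
--     suitable_containers = []
--     for container in containers:
--
--         # 检查容器是否比所有 items 中最大的边长都大，作为合适的容器
--         if (container[0] >= max_length and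
--             container[1] >= max_width and
--             container[2] >= max_height):
--             suitable_containers.append(container)
--
--     # 如果找到合适的容器，返回与最大物体体积最接近的那个
--     if suitable_containers:
--         return min(suitable_containers, key=lambda c: c[0] * c[1] * c[2] - thr_volume)
--
--     return (54, 45, 36)  # 若未找到合适的容器则返回最大的
-- ===== SOURCE B (Python) =====
-- def select_container(items, containers):
--     max_length = max(item[0] for item in items)
--     max_width = max(item[1] for item in items)
--     max_height = max(item[2] for item in items)
--
--     # first-fit over containers sorted by volume (stable sort keeps min()'s tie-break)
--     for container in sorted(containers, key=lambda c: c[0] * c[1] * c[2]):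
--         if (container[0] >= max_length and
--             container[1] >= max_width and
--             container[2] >= max_height):
--             return container
--
--     return (54, 45, 36)
-- ===== Notes on version B (the rewrite author's own statement) =====
-- stated objective: alternative
-- what changed: A filters all fitting containers into a list and then takes min by (volume - max item volume); B drops the redundant volume offset, sorts the containers by volume (stable) and returns the first fitting one in that order.
import Mathlib
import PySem

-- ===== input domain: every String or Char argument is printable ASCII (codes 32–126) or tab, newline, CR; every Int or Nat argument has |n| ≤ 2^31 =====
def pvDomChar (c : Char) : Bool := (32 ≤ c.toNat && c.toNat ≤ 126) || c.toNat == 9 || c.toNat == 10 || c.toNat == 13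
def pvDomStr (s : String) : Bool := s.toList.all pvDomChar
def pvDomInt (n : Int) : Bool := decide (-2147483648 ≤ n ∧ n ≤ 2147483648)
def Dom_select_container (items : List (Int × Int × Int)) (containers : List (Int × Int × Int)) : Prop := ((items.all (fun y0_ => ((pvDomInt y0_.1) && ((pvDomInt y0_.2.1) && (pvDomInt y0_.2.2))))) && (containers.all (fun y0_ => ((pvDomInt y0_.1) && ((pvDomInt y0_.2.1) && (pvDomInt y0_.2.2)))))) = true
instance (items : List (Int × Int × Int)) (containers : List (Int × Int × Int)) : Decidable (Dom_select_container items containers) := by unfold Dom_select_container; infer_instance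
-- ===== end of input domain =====

-- B replaces A's filter-all-then-min(key = volume - max item volume) by a stable sort of the
-- containers by volume followed by a first-fit scan (the constant offset cannot change the argmin);
-- objective: alternative decomposition, same results.

-- ===== PORT A =====
def select_container (items : List (Int × Int × Int)) (containers : List (Int × Int × Int)) : Int × Int × Int :=
  let max_length := (PySem.List.max? (items.map (fun it => it.1)) (fun x => x)).getD 0
  let max_width  := (PySem.List.max? (items.map (fun it => it.2.1)) (fun x => x)).getD 0
  let max_height := (PySem.List.max? (items.map (fun it => it.2.2)) (fun x => x)).getD 0
  let thr_volume := (PySem.List.max? (items.map (fun it => it.1 * it.2.1 * it.2.2)) (fun x => x)).getD 0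
  let suitable := containers.foldl (fun acc c =>
    if max_length ≤ c.1 ∧ max_width ≤ c.2.1 ∧ max_height ≤ c.2.2 then acc ++ [c] else acc) []
  match PySem.List.min? suitable (fun c => c.1 * c.2.1 * c.2.2 - thr_volume) with
  | some c => c
  | none => (54, 45, 36)

-- ===== PORT B =====
def firstFitB (maxL maxW maxH : Int) : List (Int × Int × Int) → Int × Int × Int
  | [] => (54, 45, 36)
  | c :: rest => if maxL ≤ c.1 ∧ maxW ≤ c.2.1 ∧ maxH ≤ c.2.2 then c else firstFitB maxL maxW maxH rest

def select_container_alt (items : List (Int × Int × Int)) (containers : List (Int × Int × Int)) : Int × Int × Int :=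
  let max_length := (PySem.List.max? (items.map (fun it => it.1)) (fun x => x)).getD 0
  let max_width  := (PySem.List.max? (items.map (fun it => it.2.1)) (fun x => x)).getD 0
  let max_height := (PySem.List.max? (items.map (fun it => it.2.2)) (fun x => x)).getD 0
  firstFitB max_length max_width max_height
    (PySem.List.sorted containers (fun c => c.1 * c.2.1 * c.2.2))

-- ===== PRECONDITION & SPEC =====
-- Pre_ excludes only items = [], on which Python's max() (in A and in B alike) raises ValueError.
def Pre_select_container (items : List (Int × Int × Int)) (containers : List (Int × Int × Int)) : Prop := items ≠ []
instance (items : List (Int × Int × Int)) (containers : List (Int × Int × Int)) : Decidable (Pre_select_container items containers) := by unfold Pre_select_container; infer_instance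
def pvWitness_select_container : (List (Int × Int × Int)) × (List (Int × Int × Int)) := ([(1, 2, 3)], [(2, 2, 3), (5, 5, 5)])

def Spec_select_container (items : List (Int × Int × Int)) (containers : List (Int × Int × Int)) (out : Int × Int × Int) : Prop := out = select_container_alt items containers
instance (items : List (Int × Int × Int)) (containers : List (Int × Int × Int)) (out : Int × Int × Int) : Decidable (Spec_select_container items containers out) := by unfold Spec_select_container; infer_instance

-- ===== CLAIM (what is proved, stated in full; the proofs are below) =====
def Claim_equal_select_container : Prop := ∀ (items : List (Int × Int × Int)) (containers : List (Int × Int × Int)), Dom_select_container items containers → Pre_select_container items containers → Spec_select_container items containers (select_container items containers)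

-- ===== LEMMAS AND PROOFS =====

-- filtering commutes with insertion into a key-sorted list
theorem insertBy_filter {α κ : Type} [LinearOrder κ] (key : α → κ) (p : α → Bool) (x : α)
    (l : List α) (hl : l.Pairwise (fun a b => key a ≤ key b)) :
    (PySem.List.insertBy (fun a b => decide (key a < key b)) x l).filter p
      = if p x then PySem.List.insertBy (fun a b => decide (key a < key b)) x (l.filter p)
        else l.filter p := by
  induction l with
  | nil => by_cases hpx : p x <;> simp [PySem.List.insertBy, hpx]
  | cons y l ih =>
    rcases List.pairwise_cons.mp hl with ⟨hy, hl'⟩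
    have hfront : ∀ m : List α, (∀ z ∈ m, key x < key z) →
        PySem.List.insertBy (fun a b => decide (key a < key b)) x m = x :: m := by
      intro m hm; cases m with
      | nil => rfl
      | cons z m => simp [PySem.List.insertBy, hm z (by simp)]
    by_cases hxy : key x < key y
    · simp only [PySem.List.insertBy, hxy, decide_true, if_true]
      by_cases hpx : p x
      · rw [List.filter_cons_of_pos hpx, if_pos hpx]
        by_cases hpy : p y
        · rw [List.filter_cons_of_pos hpy, hfront]
          intro z hz
          rcases List.mem_cons.mp hz with h | h
          · subst h; exact hxy
          · exact lt_of_lt_of_le hxy (hy z (List.mem_of_mem_filter h))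
        · rw [List.filter_cons_of_neg hpy, hfront]
          intro z hz
          exact lt_of_lt_of_le hxy (hy z (List.mem_of_mem_filter hz))
      · simp [List.filter_cons, hpx]
    · simp only [PySem.List.insertBy, hxy, decide_false, Bool.false_eq_true, if_false]
      by_cases hpy : p y
      · by_cases hpx : p x
        · rw [List.filter_cons_of_pos hpy, ih hl', List.filter_cons_of_pos hpy]
          simp [hpx, PySem.List.insertBy, hxy]
        · rw [List.filter_cons_of_pos hpy, ih hl', List.filter_cons_of_pos hpy]
          simp [hpx]
      · rw [List.filter_cons_of_neg hpy, ih hl', List.filter_cons_of_neg hpy]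

-- filtering commutes with the stable sort
theorem sorted_filter {α κ : Type} [LinearOrder κ] (key : α → κ) (p : α → Bool) (xs : List α) :
    (PySem.List.sorted xs key).filter p = PySem.List.sorted (xs.filter p) key := by
  induction xs using List.reverseRecOn with
  | nil => rfl
  | append_singleton xs x ih =>
    have hstep : ∀ ys : List α, PySem.List.sorted (ys ++ [x]) key
        = PySem.List.insertBy (fun a b => decide (key a < key b)) x (PySem.List.sorted ys key) := by
      intro ys
      rw [PySem.List.sorted_eq_foldl_insertBy, PySem.List.sorted_eq_foldl_insertBy,
          List.foldl_append]
      rfl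
    rw [hstep, insertBy_filter key p x _ (PySem.List.sorted_pairwise xs key), ih]
    by_cases hpx : p x
    · rw [List.filter_append, List.filter_cons_of_pos hpx]
      simp only [List.filter_nil, hpx, if_true]
      rw [hstep]
    · rw [List.filter_append, List.filter_cons_of_neg hpx]
      simp [hpx]

-- Python's min(xs, key) is the head of the stable sort
theorem min?_eq_head_sorted {α κ : Type} [LinearOrder κ] (key : α → κ) (xs : List α) :
    PySem.List.min? xs key = (PySem.List.sorted xs key).head? := by
  induction xs using List.reverseRecOn with
  | nil => rfl
  | append_singleton xs x ih =>
    have hstep : PySem.List.sorted (xs ++ [x]) key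
        = PySem.List.insertBy (fun a b => decide (key a < key b)) x (PySem.List.sorted xs key) := by
      rw [PySem.List.sorted_eq_foldl_insertBy, PySem.List.sorted_eq_foldl_insertBy,
          List.foldl_append]
      rfl
    rw [hstep]
    unfold PySem.List.min? at *
    rw [List.foldl_append]
    simp only [List.foldl_cons, List.foldl_nil]
    rw [ih]
    cases hs : PySem.List.sorted xs key with
    | nil => simp [PySem.List.insertBy]
    | cons m t =>
      simp only [List.head?_cons]
      by_cases hxm : key x < key m
      · simp [PySem.List.insertBy, hxm]
      · simp [PySem.List.insertBy, hxm]

-- subtracting a constant from the key does not change min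
theorem min?_key_shift {α : Type} (key : α → Int) (t : Int) (xs : List α) :
    PySem.List.min? xs (fun c => key c - t) = PySem.List.min? xs key := by
  unfold PySem.List.min?
  congr 1
  funext acc x
  cases acc with
  | none => rfl
  | some m => by_cases h : key x < key m <;> simp [sub_lt_sub_iff_right, h]

-- B's first-fit scan is the head of the filtered list
theorem firstFitB_eq_head_filter (maxL maxW maxH : Int) (s : List (Int × Int × Int)) :
    firstFitB maxL maxW maxH s
      = ((s.filter (fun c => decide (maxL ≤ c.1 ∧ maxW ≤ c.2.1 ∧ maxH ≤ c.2.2))).head?).getD (54, 45, 36) := by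
  induction s with
  | nil => rfl
  | cons c s ih =>
    by_cases hc : maxL ≤ c.1 ∧ maxW ≤ c.2.1 ∧ maxH ≤ c.2.2
    · simp [firstFitB, hc]
    · simp [firstFitB, hc, ih]

-- A's accumulation loop is a filter
theorem suitable_eq_filter (maxL maxW maxH : Int) (containers : List (Int × Int × Int)) :
    containers.foldl (fun acc c =>
        if maxL ≤ c.1 ∧ maxW ≤ c.2.1 ∧ maxH ≤ c.2.2 then acc ++ [c] else acc) []
      = containers.filter (fun c => decide (maxL ≤ c.1 ∧ maxW ≤ c.2.1 ∧ maxH ≤ c.2.2)) := by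
  have h := PySem.List.foldl_append_if
    (fun c : Int × Int × Int => decide (maxL ≤ c.1 ∧ maxW ≤ c.2.1 ∧ maxH ≤ c.2.2))
    (fun c => c) containers []
  simpa [List.map_id'] using h

-- ===== VERDICT (by name: the statement is the Claim_ definition above) =====
theorem select_container_spec : Claim_equal_select_container := by
  intro items containers _ _
  unfold Spec_select_container select_container select_container_alt
  simp only []
  rw [suitable_eq_filter, min?_key_shift, min?_eq_head_sorted, ← sorted_filter,
      firstFitB_eq_head_filter]
  cases h : ((PySem.List.sorted containers (fun c => c.1 * c.2.1 * c.2.2)).filter _).head? with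
  | none => simp
  | some c => simp
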